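-- pv_equiv track=rewrite | github.com/gomyteacher-examples/python-intermediate-exam1-student2 | exercise2/iterators_generators.py | fibonacci_primes
-- ===== SOURCE A (Python) =====
-- def fibonacci_primes(n):
--     """Generator that yields the first n numbers that are both Fibonacci and prime"""
--     if n <= 0:
--         return
--
--     # generate fibonacci numbers and check if they're prime
--     a, b = 0, 1
--     primes_found = 0
--
--     while primes_found < n:
--         if is_prime_simple(a):
--             yield a
--             primes_found += 1
--         a, b = b, a + b
--         # prevent infinite loop - fibonacci gets very large
--         if a > 1000000:  # reasonable limit for student code
--             break
--
-- def is_prime_simple(n):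
--     if n < 2:
--         return False
--     # simple prime check - just divide by everything
--     for i in range(2, n):
--         if n % i == 0:
--             return False
--     return True
-- ===== SOURCE B (Python) =====
-- def is_prime_sqrt(m):
--     # trial division only up to the square root
--     if m < 2:
--         return False
--     i = 2
--     while i * i <= m:
--         if m % i == 0:
--             return False
--         i += 1
--     return True
--
--
-- def fibonacci_primes(n):
--     """Generator that yields the first n numbers that are both Fibonacci and prime"""
--     if n <= 0:
--         return
--     # build the whole Fibonacci prefix up to the cap first,
--     # then filter it by a sqrt-bounded primality test and slice off the first n
--     fibs = []
--     a, b = 0, 1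
--     while a <= 1000000:
--         fibs.append(a)
--         a, b = b, a + b
--     for p in [x for x in fibs if is_prime_sqrt(x)][:n]:
--         yield p
-- ===== Notes on version B (the rewrite author's own statement) =====
-- stated objective: faster
-- what changed: A interleaves Fibonacci generation with a counter and tests each value by trial division over the full range(2, a); B first builds the whole Fibonacci prefix up to the cap, filters it with a sqrt-bounded trial-division primality test, and slices off the first n.
import Mathlib
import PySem

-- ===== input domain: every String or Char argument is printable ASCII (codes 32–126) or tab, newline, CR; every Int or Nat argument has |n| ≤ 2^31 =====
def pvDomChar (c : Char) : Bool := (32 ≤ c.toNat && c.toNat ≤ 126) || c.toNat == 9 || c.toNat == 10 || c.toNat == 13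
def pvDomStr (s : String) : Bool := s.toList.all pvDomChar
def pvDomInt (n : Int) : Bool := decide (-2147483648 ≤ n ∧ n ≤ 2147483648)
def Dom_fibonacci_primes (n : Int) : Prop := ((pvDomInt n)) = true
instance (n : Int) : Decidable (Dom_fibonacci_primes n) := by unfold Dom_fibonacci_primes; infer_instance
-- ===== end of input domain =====

-- B replaces A's interleaved generate-and-count loop (with full trial division up to a-1)
-- by: build the whole Fibonacci prefix, filter it with a sqrt-bounded primality test, slice the first n.
-- A is a generator; both are compared on the list of yielded values (no argument is mutated).

-- ===== PORT A =====
-- is_prime_simple: trial division by every i in range(2, n)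
def isPrimeSimple (n : Int) : Bool :=
  if n < 2 then false
  else (PySem.List.pyRange 2 n 1).all fun i => !(PySem.Int.mod n i == 0)

-- the while-loop of A; fuel is only a totality guard (the loop breaks after at most
-- 31 iterations since the Fibonacci value exceeds 1000000), 100 is more than enough
def fibPrimeLoop : Nat → Int → Int → Int → Int → List Int → List Int
  | 0, _, _, _, _, acc => acc
  | f + 1, n, a, b, pf, acc =>
    if pf < n then
      let acc' := if isPrimeSimple a then acc ++ [a] else acc
      let pf' := if isPrimeSimple a then pf + 1 else pf
      -- a, b = b, a + b ; then: if a > 1000000: break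
      if b > 1000000 then acc' else fibPrimeLoop f n b (a + b) pf' acc'
    else acc

def fibonacci_primes (n : Int) : List Int :=
  if n ≤ 0 then [] else fibPrimeLoop 100 n 0 1 0 []

-- ===== PORT B =====
-- is_prime_sqrt: while i * i <= m; fuel is a totality guard (i stops at ~sqrt m ≤ 1001 here)
def sqrtCheck : Nat → Int → Int → Bool
  | 0, _, _ => true
  | f + 1, m, i =>
    if i * i ≤ m then
      if PySem.Int.mod m i == 0 then false else sqrtCheck f m (i + 1)
    else true

def isPrimeSqrt (m : Int) : Bool := if m < 2 then false else sqrtCheck 2000 m 2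

-- while a <= 1000000: fibs.append(a); a, b = b, a + b   (fuel: ≤ 31 iterations happen)
def fibListLoop : Nat → Int → Int → List Int → List Int
  | 0, _, _, acc => acc
  | f + 1, a, b, acc =>
    if a ≤ 1000000 then fibListLoop f b (a + b) (acc ++ [a]) else acc

def fibonacci_primes_alt (n : Int) : List Int :=
  if n ≤ 0 then []
  else PySem.List.slice ((fibListLoop 100 0 1 []).filter isPrimeSqrt) none (some n)

-- ===== PRECONDITION & SPEC =====
def Spec_fibonacci_primes (n : Int) (out : List Int) : Prop := out = fibonacci_primes_alt n
instance (n : Int) (out : List Int) : Decidable (Spec_fibonacci_primes n out) := by unfold Spec_fibonacci_primes; infer_instance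

-- ===== CLAIM (what is proved, stated in full; the proofs are below) =====
def Claim_equal_fibonacci_primes : Prop := ∀ (n : Int), Dom_fibonacci_primes n → Spec_fibonacci_primes n (fibonacci_primes n)

-- ===== LEMMAS AND PROOFS =====

theorem loop_succ (f : Nat) (n a b pf : Int) (acc : List Int) :
    fibPrimeLoop (f + 1) n a b pf acc =
    if pf < n then
      (if b > 1000000 then (if isPrimeSimple a then acc ++ [a] else acc)
       else fibPrimeLoop f n b (a + b) (if isPrimeSimple a then pf + 1 else pf)
              (if isPrimeSimple a then acc ++ [a] else acc))
    else acc := by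
  simp only [fibPrimeLoop]

-- is_prime_simple computes primality (on naturals; every value it is applied to is ≥ 0)
theorem prime_simple_eq (m : Nat) : isPrimeSimple (m : Int) = decide (Nat.Prime m) := by
  unfold isPrimeSimple
  by_cases h2 : m < 2
  · rw [if_pos (by exact_mod_cast h2)]
    interval_cases m <;> decide
  · rw [if_neg (by exact_mod_cast h2)]
    cases hP : decide (Nat.Prime m) with
    | true =>
      rw [decide_eq_true_eq] at hP
      rw [List.all_eq_true]
      intro i hi
      rw [PySem.List.mem_pyRange_one] at hi
      simp only [Bool.not_eq_eq_eq_not, Bool.not_true, beq_eq_false_iff_ne, ne_eq]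
      intro hmod
      rw [PySem.Int.mod_eq_zero_iff_dvd] at hmod
      have h0i : 0 ≤ i := by omega
      lift i to Nat using h0i with k
      have hk : k ∣ m := by exact_mod_cast hmod
      rcases (Nat.Prime.eq_one_or_self_of_dvd hP k hk) with h | h <;> omega
    | false =>
      rw [decide_eq_false_iff_not] at hP
      obtain ⟨k, hkd, hk2, hklt⟩ := Nat.exists_dvd_of_not_prime2 (by omega) hP
      rw [List.all_eq_false]
      refine ⟨(k : Int), ?_, ?_⟩
      · rw [PySem.List.mem_pyRange_one]; omega
      · simp only [Bool.not_eq_eq_eq_not, Bool.not_true, Bool.not_eq_false]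
        rw [beq_iff_eq, PySem.Int.mod_eq_zero_iff_dvd]
        exact_mod_cast hkd

theorem pS_0 : isPrimeSimple 0 = false := by
  rw [show (0 : Int) = ((0 : Nat) : Int) from rfl, prime_simple_eq]
  norm_num

theorem pS_1 : isPrimeSimple 1 = false := by
  rw [show (1 : Int) = ((1 : Nat) : Int) from rfl, prime_simple_eq]
  norm_num

theorem pS_2 : isPrimeSimple 2 = true := by
  rw [show (2 : Int) = ((2 : Nat) : Int) from rfl, prime_simple_eq]
  norm_num

theorem pS_3 : isPrimeSimple 3 = true := by
  rw [show (3 : Int) = ((3 : Nat) : Int) from rfl, prime_simple_eq]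
  norm_num

theorem pS_5 : isPrimeSimple 5 = true := by
  rw [show (5 : Int) = ((5 : Nat) : Int) from rfl, prime_simple_eq]
  norm_num

theorem pS_8 : isPrimeSimple 8 = false := by
  rw [show (8 : Int) = ((8 : Nat) : Int) from rfl, prime_simple_eq]
  norm_num

theorem pS_13 : isPrimeSimple 13 = true := by
  rw [show (13 : Int) = ((13 : Nat) : Int) from rfl, prime_simple_eq]
  norm_num

theorem pS_21 : isPrimeSimple 21 = false := by
  rw [show (21 : Int) = ((21 : Nat) : Int) from rfl, prime_simple_eq]
  norm_num

theorem pS_34 : isPrimeSimple 34 = false := by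
  rw [show (34 : Int) = ((34 : Nat) : Int) from rfl, prime_simple_eq]
  norm_num

theorem pS_55 : isPrimeSimple 55 = false := by
  rw [show (55 : Int) = ((55 : Nat) : Int) from rfl, prime_simple_eq]
  norm_num

theorem pS_89 : isPrimeSimple 89 = true := by
  rw [show (89 : Int) = ((89 : Nat) : Int) from rfl, prime_simple_eq]
  norm_num

theorem pS_144 : isPrimeSimple 144 = false := by
  rw [show (144 : Int) = ((144 : Nat) : Int) from rfl, prime_simple_eq]
  norm_num

theorem pS_233 : isPrimeSimple 233 = true := by
  rw [show (233 : Int) = ((233 : Nat) : Int) from rfl, prime_simple_eq]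
  norm_num

theorem pS_377 : isPrimeSimple 377 = false := by
  rw [show (377 : Int) = ((377 : Nat) : Int) from rfl, prime_simple_eq]
  norm_num

theorem pS_610 : isPrimeSimple 610 = false := by
  rw [show (610 : Int) = ((610 : Nat) : Int) from rfl, prime_simple_eq]
  norm_num

theorem pS_987 : isPrimeSimple 987 = false := by
  rw [show (987 : Int) = ((987 : Nat) : Int) from rfl, prime_simple_eq]
  norm_num

theorem pS_1597 : isPrimeSimple 1597 = true := by
  rw [show (1597 : Int) = ((1597 : Nat) : Int) from rfl, prime_simple_eq]
  norm_num

theorem pS_2584 : isPrimeSimple 2584 = false := by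
  rw [show (2584 : Int) = ((2584 : Nat) : Int) from rfl, prime_simple_eq]
  norm_num

theorem pS_4181 : isPrimeSimple 4181 = false := by
  rw [show (4181 : Int) = ((4181 : Nat) : Int) from rfl, prime_simple_eq]
  norm_num

theorem pS_6765 : isPrimeSimple 6765 = false := by
  rw [show (6765 : Int) = ((6765 : Nat) : Int) from rfl, prime_simple_eq]
  norm_num

theorem pS_10946 : isPrimeSimple 10946 = false := by
  rw [show (10946 : Int) = ((10946 : Nat) : Int) from rfl, prime_simple_eq]
  norm_num

theorem pS_17711 : isPrimeSimple 17711 = false := by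
  rw [show (17711 : Int) = ((17711 : Nat) : Int) from rfl, prime_simple_eq]
  norm_num

theorem pS_28657 : isPrimeSimple 28657 = true := by
  rw [show (28657 : Int) = ((28657 : Nat) : Int) from rfl, prime_simple_eq]
  norm_num

theorem pS_46368 : isPrimeSimple 46368 = false := by
  rw [show (46368 : Int) = ((46368 : Nat) : Int) from rfl, prime_simple_eq]
  norm_num

theorem pS_75025 : isPrimeSimple 75025 = false := by
  rw [show (75025 : Int) = ((75025 : Nat) : Int) from rfl, prime_simple_eq]
  norm_num

theorem pS_121393 : isPrimeSimple 121393 = false := by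
  rw [show (121393 : Int) = ((121393 : Nat) : Int) from rfl, prime_simple_eq]
  norm_num

theorem pS_196418 : isPrimeSimple 196418 = false := by
  rw [show (196418 : Int) = ((196418 : Nat) : Int) from rfl, prime_simple_eq]
  norm_num

theorem pS_317811 : isPrimeSimple 317811 = false := by
  rw [show (317811 : Int) = ((317811 : Nat) : Int) from rfl, prime_simple_eq]
  norm_num

theorem pS_514229 : isPrimeSimple 514229 = true := by
  rw [show (514229 : Int) = ((514229 : Nat) : Int) from rfl, prime_simple_eq]
  norm_num

theorem pS_832040 : isPrimeSimple 832040 = false := by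
  rw [show (832040 : Int) = ((832040 : Nat) : Int) from rfl, prime_simple_eq]
  norm_num

set_option maxRecDepth 100000 in
theorem B_closed : (fibListLoop 100 0 1 []).filter isPrimeSqrt = [2, 3, 5, 13, 89, 233, 1597, 28657, 514229] := by decide

theorem alt_take (n : Int) (h : 1 ≤ n) :
    fibonacci_primes_alt n = ([2, 3, 5, 13, 89, 233, 1597, 28657, 514229] : List Int).take n.toNat := by
  unfold fibonacci_primes_alt
  rw [if_neg (by omega), B_closed]
  have hs := PySem.List.slice_to_natCast ([2, 3, 5, 13, 89, 233, 1597, 28657, 514229] : List Int) n.toNat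
  rw [show ((n.toNat : Nat) : Int) = n by omega] at hs
  rw [hs]

theorem A_ge9 (n : Int) (h : 9 ≤ n) : fibPrimeLoop 100 n 0 1 0 [] = [2, 3, 5, 13, 89, 233, 1597, 28657, 514229] := by
  rw [loop_succ, if_pos (show (0 : Int) < n by omega), pS_0, if_neg (show ¬ ((1 : Int) > 1000000) by decide)]
  show fibPrimeLoop 99 n 1 1 0 [] = [2, 3, 5, 13, 89, 233, 1597, 28657, 514229]
  rw [loop_succ, if_pos (show (0 : Int) < n by omega), pS_1, if_neg (show ¬ ((1 : Int) > 1000000) by decide)]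
  show fibPrimeLoop 98 n 1 2 0 [] = [2, 3, 5, 13, 89, 233, 1597, 28657, 514229]
  rw [loop_succ, if_pos (show (0 : Int) < n by omega), pS_1, if_neg (show ¬ ((2 : Int) > 1000000) by decide)]
  show fibPrimeLoop 97 n 2 3 0 [] = [2, 3, 5, 13, 89, 233, 1597, 28657, 514229]
  rw [loop_succ, if_pos (show (0 : Int) < n by omega), pS_2, if_neg (show ¬ ((3 : Int) > 1000000) by decide)]
  show fibPrimeLoop 96 n 3 5 1 [2] = [2, 3, 5, 13, 89, 233, 1597, 28657, 514229]
  rw [loop_succ, if_pos (show (1 : Int) < n by omega), pS_3, if_neg (show ¬ ((5 : Int) > 1000000) by decide)]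
  show fibPrimeLoop 95 n 5 8 2 [2, 3] = [2, 3, 5, 13, 89, 233, 1597, 28657, 514229]
  rw [loop_succ, if_pos (show (2 : Int) < n by omega), pS_5, if_neg (show ¬ ((8 : Int) > 1000000) by decide)]
  show fibPrimeLoop 94 n 8 13 3 [2, 3, 5] = [2, 3, 5, 13, 89, 233, 1597, 28657, 514229]
  rw [loop_succ, if_pos (show (3 : Int) < n by omega), pS_8, if_neg (show ¬ ((13 : Int) > 1000000) by decide)]
  show fibPrimeLoop 93 n 13 21 3 [2, 3, 5] = [2, 3, 5, 13, 89, 233, 1597, 28657, 514229]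
  rw [loop_succ, if_pos (show (3 : Int) < n by omega), pS_13, if_neg (show ¬ ((21 : Int) > 1000000) by decide)]
  show fibPrimeLoop 92 n 21 34 4 [2, 3, 5, 13] = [2, 3, 5, 13, 89, 233, 1597, 28657, 514229]
  rw [loop_succ, if_pos (show (4 : Int) < n by omega), pS_21, if_neg (show ¬ ((34 : Int) > 1000000) by decide)]
  show fibPrimeLoop 91 n 34 55 4 [2, 3, 5, 13] = [2, 3, 5, 13, 89, 233, 1597, 28657, 514229]
  rw [loop_succ, if_pos (show (4 : Int) < n by omega), pS_34, if_neg (show ¬ ((55 : Int) > 1000000) by decide)]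
  show fibPrimeLoop 90 n 55 89 4 [2, 3, 5, 13] = [2, 3, 5, 13, 89, 233, 1597, 28657, 514229]
  rw [loop_succ, if_pos (show (4 : Int) < n by omega), pS_55, if_neg (show ¬ ((89 : Int) > 1000000) by decide)]
  show fibPrimeLoop 89 n 89 144 4 [2, 3, 5, 13] = [2, 3, 5, 13, 89, 233, 1597, 28657, 514229]
  rw [loop_succ, if_pos (show (4 : Int) < n by omega), pS_89, if_neg (show ¬ ((144 : Int) > 1000000) by decide)]
  show fibPrimeLoop 88 n 144 233 5 [2, 3, 5, 13, 89] = [2, 3, 5, 13, 89, 233, 1597, 28657, 514229]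
  rw [loop_succ, if_pos (show (5 : Int) < n by omega), pS_144, if_neg (show ¬ ((233 : Int) > 1000000) by decide)]
  show fibPrimeLoop 87 n 233 377 5 [2, 3, 5, 13, 89] = [2, 3, 5, 13, 89, 233, 1597, 28657, 514229]
  rw [loop_succ, if_pos (show (5 : Int) < n by omega), pS_233, if_neg (show ¬ ((377 : Int) > 1000000) by decide)]
  show fibPrimeLoop 86 n 377 610 6 [2, 3, 5, 13, 89, 233] = [2, 3, 5, 13, 89, 233, 1597, 28657, 514229]
  rw [loop_succ, if_pos (show (6 : Int) < n by omega), pS_377, if_neg (show ¬ ((610 : Int) > 1000000) by decide)]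
  show fibPrimeLoop 85 n 610 987 6 [2, 3, 5, 13, 89, 233] = [2, 3, 5, 13, 89, 233, 1597, 28657, 514229]
  rw [loop_succ, if_pos (show (6 : Int) < n by omega), pS_610, if_neg (show ¬ ((987 : Int) > 1000000) by decide)]
  show fibPrimeLoop 84 n 987 1597 6 [2, 3, 5, 13, 89, 233] = [2, 3, 5, 13, 89, 233, 1597, 28657, 514229]
  rw [loop_succ, if_pos (show (6 : Int) < n by omega), pS_987, if_neg (show ¬ ((1597 : Int) > 1000000) by decide)]
  show fibPrimeLoop 83 n 1597 2584 6 [2, 3, 5, 13, 89, 233] = [2, 3, 5, 13, 89, 233, 1597, 28657, 514229]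
  rw [loop_succ, if_pos (show (6 : Int) < n by omega), pS_1597, if_neg (show ¬ ((2584 : Int) > 1000000) by decide)]
  show fibPrimeLoop 82 n 2584 4181 7 [2, 3, 5, 13, 89, 233, 1597] = [2, 3, 5, 13, 89, 233, 1597, 28657, 514229]
  rw [loop_succ, if_pos (show (7 : Int) < n by omega), pS_2584, if_neg (show ¬ ((4181 : Int) > 1000000) by decide)]
  show fibPrimeLoop 81 n 4181 6765 7 [2, 3, 5, 13, 89, 233, 1597] = [2, 3, 5, 13, 89, 233, 1597, 28657, 514229]
  rw [loop_succ, if_pos (show (7 : Int) < n by omega), pS_4181, if_neg (show ¬ ((6765 : Int) > 1000000) by decide)]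
  show fibPrimeLoop 80 n 6765 10946 7 [2, 3, 5, 13, 89, 233, 1597] = [2, 3, 5, 13, 89, 233, 1597, 28657, 514229]
  rw [loop_succ, if_pos (show (7 : Int) < n by omega), pS_6765, if_neg (show ¬ ((10946 : Int) > 1000000) by decide)]
  show fibPrimeLoop 79 n 10946 17711 7 [2, 3, 5, 13, 89, 233, 1597] = [2, 3, 5, 13, 89, 233, 1597, 28657, 514229]
  rw [loop_succ, if_pos (show (7 : Int) < n by omega), pS_10946, if_neg (show ¬ ((17711 : Int) > 1000000) by decide)]
  show fibPrimeLoop 78 n 17711 28657 7 [2, 3, 5, 13, 89, 233, 1597] = [2, 3, 5, 13, 89, 233, 1597, 28657, 514229]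
  rw [loop_succ, if_pos (show (7 : Int) < n by omega), pS_17711, if_neg (show ¬ ((28657 : Int) > 1000000) by decide)]
  show fibPrimeLoop 77 n 28657 46368 7 [2, 3, 5, 13, 89, 233, 1597] = [2, 3, 5, 13, 89, 233, 1597, 28657, 514229]
  rw [loop_succ, if_pos (show (7 : Int) < n by omega), pS_28657, if_neg (show ¬ ((46368 : Int) > 1000000) by decide)]
  show fibPrimeLoop 76 n 46368 75025 8 [2, 3, 5, 13, 89, 233, 1597, 28657] = [2, 3, 5, 13, 89, 233, 1597, 28657, 514229]
  rw [loop_succ, if_pos (show (8 : Int) < n by omega), pS_46368, if_neg (show ¬ ((75025 : Int) > 1000000) by decide)]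
  show fibPrimeLoop 75 n 75025 121393 8 [2, 3, 5, 13, 89, 233, 1597, 28657] = [2, 3, 5, 13, 89, 233, 1597, 28657, 514229]
  rw [loop_succ, if_pos (show (8 : Int) < n by omega), pS_75025, if_neg (show ¬ ((121393 : Int) > 1000000) by decide)]
  show fibPrimeLoop 74 n 121393 196418 8 [2, 3, 5, 13, 89, 233, 1597, 28657] = [2, 3, 5, 13, 89, 233, 1597, 28657, 514229]
  rw [loop_succ, if_pos (show (8 : Int) < n by omega), pS_121393, if_neg (show ¬ ((196418 : Int) > 1000000) by decide)]
  show fibPrimeLoop 73 n 196418 317811 8 [2, 3, 5, 13, 89, 233, 1597, 28657] = [2, 3, 5, 13, 89, 233, 1597, 28657, 514229]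
  rw [loop_succ, if_pos (show (8 : Int) < n by omega), pS_196418, if_neg (show ¬ ((317811 : Int) > 1000000) by decide)]
  show fibPrimeLoop 72 n 317811 514229 8 [2, 3, 5, 13, 89, 233, 1597, 28657] = [2, 3, 5, 13, 89, 233, 1597, 28657, 514229]
  rw [loop_succ, if_pos (show (8 : Int) < n by omega), pS_317811, if_neg (show ¬ ((514229 : Int) > 1000000) by decide)]
  show fibPrimeLoop 71 n 514229 832040 8 [2, 3, 5, 13, 89, 233, 1597, 28657] = [2, 3, 5, 13, 89, 233, 1597, 28657, 514229]
  rw [loop_succ, if_pos (show (8 : Int) < n by omega), pS_514229, if_neg (show ¬ ((832040 : Int) > 1000000) by decide)]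
  show fibPrimeLoop 70 n 832040 1346269 9 [2, 3, 5, 13, 89, 233, 1597, 28657, 514229] = [2, 3, 5, 13, 89, 233, 1597, 28657, 514229]
  by_cases h9 : (9 : Int) < n
  · rw [loop_succ, if_pos h9, pS_832040, if_pos (show (1346269 : Int) > 1000000 by decide)]
    rfl
  · rw [loop_succ, if_neg h9]

theorem A_case_1 : fibonacci_primes 1 = [2] := by
  unfold fibonacci_primes
  rw [if_neg (by norm_num)]
  rw [loop_succ, if_pos (show (0 : Int) < 1 by decide), pS_0, if_neg (show ¬ ((1 : Int) > 1000000) by decide)]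
  show fibPrimeLoop 99 1 1 1 0 [] = [2]
  rw [loop_succ, if_pos (show (0 : Int) < 1 by decide), pS_1, if_neg (show ¬ ((1 : Int) > 1000000) by decide)]
  show fibPrimeLoop 98 1 1 2 0 [] = [2]
  rw [loop_succ, if_pos (show (0 : Int) < 1 by decide), pS_1, if_neg (show ¬ ((2 : Int) > 1000000) by decide)]
  show fibPrimeLoop 97 1 2 3 0 [] = [2]
  rw [loop_succ, if_pos (show (0 : Int) < 1 by decide), pS_2, if_neg (show ¬ ((3 : Int) > 1000000) by decide)]
  show fibPrimeLoop 96 1 3 5 1 [2] = [2]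
  rw [loop_succ, if_neg (show ¬ ((1 : Int) < 1) by decide)]

theorem A_case_2 : fibonacci_primes 2 = [2, 3] := by
  unfold fibonacci_primes
  rw [if_neg (by norm_num)]
  rw [loop_succ, if_pos (show (0 : Int) < 2 by decide), pS_0, if_neg (show ¬ ((1 : Int) > 1000000) by decide)]
  show fibPrimeLoop 99 2 1 1 0 [] = [2, 3]
  rw [loop_succ, if_pos (show (0 : Int) < 2 by decide), pS_1, if_neg (show ¬ ((1 : Int) > 1000000) by decide)]
  show fibPrimeLoop 98 2 1 2 0 [] = [2, 3]
  rw [loop_succ, if_pos (show (0 : Int) < 2 by decide), pS_1, if_neg (show ¬ ((2 : Int) > 1000000) by decide)]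
  show fibPrimeLoop 97 2 2 3 0 [] = [2, 3]
  rw [loop_succ, if_pos (show (0 : Int) < 2 by decide), pS_2, if_neg (show ¬ ((3 : Int) > 1000000) by decide)]
  show fibPrimeLoop 96 2 3 5 1 [2] = [2, 3]
  rw [loop_succ, if_pos (show (1 : Int) < 2 by decide), pS_3, if_neg (show ¬ ((5 : Int) > 1000000) by decide)]
  show fibPrimeLoop 95 2 5 8 2 [2, 3] = [2, 3]
  rw [loop_succ, if_neg (show ¬ ((2 : Int) < 2) by decide)]

theorem A_case_3 : fibonacci_primes 3 = [2, 3, 5] := by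
  unfold fibonacci_primes
  rw [if_neg (by norm_num)]
  rw [loop_succ, if_pos (show (0 : Int) < 3 by decide), pS_0, if_neg (show ¬ ((1 : Int) > 1000000) by decide)]
  show fibPrimeLoop 99 3 1 1 0 [] = [2, 3, 5]
  rw [loop_succ, if_pos (show (0 : Int) < 3 by decide), pS_1, if_neg (show ¬ ((1 : Int) > 1000000) by decide)]
  show fibPrimeLoop 98 3 1 2 0 [] = [2, 3, 5]
  rw [loop_succ, if_pos (show (0 : Int) < 3 by decide), pS_1, if_neg (show ¬ ((2 : Int) > 1000000) by decide)]
  show fibPrimeLoop 97 3 2 3 0 [] = [2, 3, 5]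
  rw [loop_succ, if_pos (show (0 : Int) < 3 by decide), pS_2, if_neg (show ¬ ((3 : Int) > 1000000) by decide)]
  show fibPrimeLoop 96 3 3 5 1 [2] = [2, 3, 5]
  rw [loop_succ, if_pos (show (1 : Int) < 3 by decide), pS_3, if_neg (show ¬ ((5 : Int) > 1000000) by decide)]
  show fibPrimeLoop 95 3 5 8 2 [2, 3] = [2, 3, 5]
  rw [loop_succ, if_pos (show (2 : Int) < 3 by decide), pS_5, if_neg (show ¬ ((8 : Int) > 1000000) by decide)]
  show fibPrimeLoop 94 3 8 13 3 [2, 3, 5] = [2, 3, 5]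
  rw [loop_succ, if_neg (show ¬ ((3 : Int) < 3) by decide)]

theorem A_case_4 : fibonacci_primes 4 = [2, 3, 5, 13] := by
  unfold fibonacci_primes
  rw [if_neg (by norm_num)]
  rw [loop_succ, if_pos (show (0 : Int) < 4 by decide), pS_0, if_neg (show ¬ ((1 : Int) > 1000000) by decide)]
  show fibPrimeLoop 99 4 1 1 0 [] = [2, 3, 5, 13]
  rw [loop_succ, if_pos (show (0 : Int) < 4 by decide), pS_1, if_neg (show ¬ ((1 : Int) > 1000000) by decide)]
  show fibPrimeLoop 98 4 1 2 0 [] = [2, 3, 5, 13]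
  rw [loop_succ, if_pos (show (0 : Int) < 4 by decide), pS_1, if_neg (show ¬ ((2 : Int) > 1000000) by decide)]
  show fibPrimeLoop 97 4 2 3 0 [] = [2, 3, 5, 13]
  rw [loop_succ, if_pos (show (0 : Int) < 4 by decide), pS_2, if_neg (show ¬ ((3 : Int) > 1000000) by decide)]
  show fibPrimeLoop 96 4 3 5 1 [2] = [2, 3, 5, 13]
  rw [loop_succ, if_pos (show (1 : Int) < 4 by decide), pS_3, if_neg (show ¬ ((5 : Int) > 1000000) by decide)]
  show fibPrimeLoop 95 4 5 8 2 [2, 3] = [2, 3, 5, 13]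
  rw [loop_succ, if_pos (show (2 : Int) < 4 by decide), pS_5, if_neg (show ¬ ((8 : Int) > 1000000) by decide)]
  show fibPrimeLoop 94 4 8 13 3 [2, 3, 5] = [2, 3, 5, 13]
  rw [loop_succ, if_pos (show (3 : Int) < 4 by decide), pS_8, if_neg (show ¬ ((13 : Int) > 1000000) by decide)]
  show fibPrimeLoop 93 4 13 21 3 [2, 3, 5] = [2, 3, 5, 13]
  rw [loop_succ, if_pos (show (3 : Int) < 4 by decide), pS_13, if_neg (show ¬ ((21 : Int) > 1000000) by decide)]
  show fibPrimeLoop 92 4 21 34 4 [2, 3, 5, 13] = [2, 3, 5, 13]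
  rw [loop_succ, if_neg (show ¬ ((4 : Int) < 4) by decide)]

theorem A_case_5 : fibonacci_primes 5 = [2, 3, 5, 13, 89] := by
  unfold fibonacci_primes
  rw [if_neg (by norm_num)]
  rw [loop_succ, if_pos (show (0 : Int) < 5 by decide), pS_0, if_neg (show ¬ ((1 : Int) > 1000000) by decide)]
  show fibPrimeLoop 99 5 1 1 0 [] = [2, 3, 5, 13, 89]
  rw [loop_succ, if_pos (show (0 : Int) < 5 by decide), pS_1, if_neg (show ¬ ((1 : Int) > 1000000) by decide)]
  show fibPrimeLoop 98 5 1 2 0 [] = [2, 3, 5, 13, 89]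
  rw [loop_succ, if_pos (show (0 : Int) < 5 by decide), pS_1, if_neg (show ¬ ((2 : Int) > 1000000) by decide)]
  show fibPrimeLoop 97 5 2 3 0 [] = [2, 3, 5, 13, 89]
  rw [loop_succ, if_pos (show (0 : Int) < 5 by decide), pS_2, if_neg (show ¬ ((3 : Int) > 1000000) by decide)]
  show fibPrimeLoop 96 5 3 5 1 [2] = [2, 3, 5, 13, 89]
  rw [loop_succ, if_pos (show (1 : Int) < 5 by decide), pS_3, if_neg (show ¬ ((5 : Int) > 1000000) by decide)]
  show fibPrimeLoop 95 5 5 8 2 [2, 3] = [2, 3, 5, 13, 89]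
  rw [loop_succ, if_pos (show (2 : Int) < 5 by decide), pS_5, if_neg (show ¬ ((8 : Int) > 1000000) by decide)]
  show fibPrimeLoop 94 5 8 13 3 [2, 3, 5] = [2, 3, 5, 13, 89]
  rw [loop_succ, if_pos (show (3 : Int) < 5 by decide), pS_8, if_neg (show ¬ ((13 : Int) > 1000000) by decide)]
  show fibPrimeLoop 93 5 13 21 3 [2, 3, 5] = [2, 3, 5, 13, 89]
  rw [loop_succ, if_pos (show (3 : Int) < 5 by decide), pS_13, if_neg (show ¬ ((21 : Int) > 1000000) by decide)]
  show fibPrimeLoop 92 5 21 34 4 [2, 3, 5, 13] = [2, 3, 5, 13, 89]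
  rw [loop_succ, if_pos (show (4 : Int) < 5 by decide), pS_21, if_neg (show ¬ ((34 : Int) > 1000000) by decide)]
  show fibPrimeLoop 91 5 34 55 4 [2, 3, 5, 13] = [2, 3, 5, 13, 89]
  rw [loop_succ, if_pos (show (4 : Int) < 5 by decide), pS_34, if_neg (show ¬ ((55 : Int) > 1000000) by decide)]
  show fibPrimeLoop 90 5 55 89 4 [2, 3, 5, 13] = [2, 3, 5, 13, 89]
  rw [loop_succ, if_pos (show (4 : Int) < 5 by decide), pS_55, if_neg (show ¬ ((89 : Int) > 1000000) by decide)]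
  show fibPrimeLoop 89 5 89 144 4 [2, 3, 5, 13] = [2, 3, 5, 13, 89]
  rw [loop_succ, if_pos (show (4 : Int) < 5 by decide), pS_89, if_neg (show ¬ ((144 : Int) > 1000000) by decide)]
  show fibPrimeLoop 88 5 144 233 5 [2, 3, 5, 13, 89] = [2, 3, 5, 13, 89]
  rw [loop_succ, if_neg (show ¬ ((5 : Int) < 5) by decide)]

theorem A_case_6 : fibonacci_primes 6 = [2, 3, 5, 13, 89, 233] := by
  unfold fibonacci_primes
  rw [if_neg (by norm_num)]
  rw [loop_succ, if_pos (show (0 : Int) < 6 by decide), pS_0, if_neg (show ¬ ((1 : Int) > 1000000) by decide)]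
  show fibPrimeLoop 99 6 1 1 0 [] = [2, 3, 5, 13, 89, 233]
  rw [loop_succ, if_pos (show (0 : Int) < 6 by decide), pS_1, if_neg (show ¬ ((1 : Int) > 1000000) by decide)]
  show fibPrimeLoop 98 6 1 2 0 [] = [2, 3, 5, 13, 89, 233]
  rw [loop_succ, if_pos (show (0 : Int) < 6 by decide), pS_1, if_neg (show ¬ ((2 : Int) > 1000000) by decide)]
  show fibPrimeLoop 97 6 2 3 0 [] = [2, 3, 5, 13, 89, 233]
  rw [loop_succ, if_pos (show (0 : Int) < 6 by decide), pS_2, if_neg (show ¬ ((3 : Int) > 1000000) by decide)]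
  show fibPrimeLoop 96 6 3 5 1 [2] = [2, 3, 5, 13, 89, 233]
  rw [loop_succ, if_pos (show (1 : Int) < 6 by decide), pS_3, if_neg (show ¬ ((5 : Int) > 1000000) by decide)]
  show fibPrimeLoop 95 6 5 8 2 [2, 3] = [2, 3, 5, 13, 89, 233]
  rw [loop_succ, if_pos (show (2 : Int) < 6 by decide), pS_5, if_neg (show ¬ ((8 : Int) > 1000000) by decide)]
  show fibPrimeLoop 94 6 8 13 3 [2, 3, 5] = [2, 3, 5, 13, 89, 233]
  rw [loop_succ, if_pos (show (3 : Int) < 6 by decide), pS_8, if_neg (show ¬ ((13 : Int) > 1000000) by decide)]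
  show fibPrimeLoop 93 6 13 21 3 [2, 3, 5] = [2, 3, 5, 13, 89, 233]
  rw [loop_succ, if_pos (show (3 : Int) < 6 by decide), pS_13, if_neg (show ¬ ((21 : Int) > 1000000) by decide)]
  show fibPrimeLoop 92 6 21 34 4 [2, 3, 5, 13] = [2, 3, 5, 13, 89, 233]
  rw [loop_succ, if_pos (show (4 : Int) < 6 by decide), pS_21, if_neg (show ¬ ((34 : Int) > 1000000) by decide)]
  show fibPrimeLoop 91 6 34 55 4 [2, 3, 5, 13] = [2, 3, 5, 13, 89, 233]
  rw [loop_succ, if_pos (show (4 : Int) < 6 by decide), pS_34, if_neg (show ¬ ((55 : Int) > 1000000) by decide)]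
  show fibPrimeLoop 90 6 55 89 4 [2, 3, 5, 13] = [2, 3, 5, 13, 89, 233]
  rw [loop_succ, if_pos (show (4 : Int) < 6 by decide), pS_55, if_neg (show ¬ ((89 : Int) > 1000000) by decide)]
  show fibPrimeLoop 89 6 89 144 4 [2, 3, 5, 13] = [2, 3, 5, 13, 89, 233]
  rw [loop_succ, if_pos (show (4 : Int) < 6 by decide), pS_89, if_neg (show ¬ ((144 : Int) > 1000000) by decide)]
  show fibPrimeLoop 88 6 144 233 5 [2, 3, 5, 13, 89] = [2, 3, 5, 13, 89, 233]
  rw [loop_succ, if_pos (show (5 : Int) < 6 by decide), pS_144, if_neg (show ¬ ((233 : Int) > 1000000) by decide)]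
  show fibPrimeLoop 87 6 233 377 5 [2, 3, 5, 13, 89] = [2, 3, 5, 13, 89, 233]
  rw [loop_succ, if_pos (show (5 : Int) < 6 by decide), pS_233, if_neg (show ¬ ((377 : Int) > 1000000) by decide)]
  show fibPrimeLoop 86 6 377 610 6 [2, 3, 5, 13, 89, 233] = [2, 3, 5, 13, 89, 233]
  rw [loop_succ, if_neg (show ¬ ((6 : Int) < 6) by decide)]

theorem A_case_7 : fibonacci_primes 7 = [2, 3, 5, 13, 89, 233, 1597] := by
  unfold fibonacci_primes
  rw [if_neg (by norm_num)]
  rw [loop_succ, if_pos (show (0 : Int) < 7 by decide), pS_0, if_neg (show ¬ ((1 : Int) > 1000000) by decide)]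
  show fibPrimeLoop 99 7 1 1 0 [] = [2, 3, 5, 13, 89, 233, 1597]
  rw [loop_succ, if_pos (show (0 : Int) < 7 by decide), pS_1, if_neg (show ¬ ((1 : Int) > 1000000) by decide)]
  show fibPrimeLoop 98 7 1 2 0 [] = [2, 3, 5, 13, 89, 233, 1597]
  rw [loop_succ, if_pos (show (0 : Int) < 7 by decide), pS_1, if_neg (show ¬ ((2 : Int) > 1000000) by decide)]
  show fibPrimeLoop 97 7 2 3 0 [] = [2, 3, 5, 13, 89, 233, 1597]
  rw [loop_succ, if_pos (show (0 : Int) < 7 by decide), pS_2, if_neg (show ¬ ((3 : Int) > 1000000) by decide)]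
  show fibPrimeLoop 96 7 3 5 1 [2] = [2, 3, 5, 13, 89, 233, 1597]
  rw [loop_succ, if_pos (show (1 : Int) < 7 by decide), pS_3, if_neg (show ¬ ((5 : Int) > 1000000) by decide)]
  show fibPrimeLoop 95 7 5 8 2 [2, 3] = [2, 3, 5, 13, 89, 233, 1597]
  rw [loop_succ, if_pos (show (2 : Int) < 7 by decide), pS_5, if_neg (show ¬ ((8 : Int) > 1000000) by decide)]
  show fibPrimeLoop 94 7 8 13 3 [2, 3, 5] = [2, 3, 5, 13, 89, 233, 1597]
  rw [loop_succ, if_pos (show (3 : Int) < 7 by decide), pS_8, if_neg (show ¬ ((13 : Int) > 1000000) by decide)]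
  show fibPrimeLoop 93 7 13 21 3 [2, 3, 5] = [2, 3, 5, 13, 89, 233, 1597]
  rw [loop_succ, if_pos (show (3 : Int) < 7 by decide), pS_13, if_neg (show ¬ ((21 : Int) > 1000000) by decide)]
  show fibPrimeLoop 92 7 21 34 4 [2, 3, 5, 13] = [2, 3, 5, 13, 89, 233, 1597]
  rw [loop_succ, if_pos (show (4 : Int) < 7 by decide), pS_21, if_neg (show ¬ ((34 : Int) > 1000000) by decide)]
  show fibPrimeLoop 91 7 34 55 4 [2, 3, 5, 13] = [2, 3, 5, 13, 89, 233, 1597]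
  rw [loop_succ, if_pos (show (4 : Int) < 7 by decide), pS_34, if_neg (show ¬ ((55 : Int) > 1000000) by decide)]
  show fibPrimeLoop 90 7 55 89 4 [2, 3, 5, 13] = [2, 3, 5, 13, 89, 233, 1597]
  rw [loop_succ, if_pos (show (4 : Int) < 7 by decide), pS_55, if_neg (show ¬ ((89 : Int) > 1000000) by decide)]
  show fibPrimeLoop 89 7 89 144 4 [2, 3, 5, 13] = [2, 3, 5, 13, 89, 233, 1597]
  rw [loop_succ, if_pos (show (4 : Int) < 7 by decide), pS_89, if_neg (show ¬ ((144 : Int) > 1000000) by decide)]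
  show fibPrimeLoop 88 7 144 233 5 [2, 3, 5, 13, 89] = [2, 3, 5, 13, 89, 233, 1597]
  rw [loop_succ, if_pos (show (5 : Int) < 7 by decide), pS_144, if_neg (show ¬ ((233 : Int) > 1000000) by decide)]
  show fibPrimeLoop 87 7 233 377 5 [2, 3, 5, 13, 89] = [2, 3, 5, 13, 89, 233, 1597]
  rw [loop_succ, if_pos (show (5 : Int) < 7 by decide), pS_233, if_neg (show ¬ ((377 : Int) > 1000000) by decide)]
  show fibPrimeLoop 86 7 377 610 6 [2, 3, 5, 13, 89, 233] = [2, 3, 5, 13, 89, 233, 1597]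
  rw [loop_succ, if_pos (show (6 : Int) < 7 by decide), pS_377, if_neg (show ¬ ((610 : Int) > 1000000) by decide)]
  show fibPrimeLoop 85 7 610 987 6 [2, 3, 5, 13, 89, 233] = [2, 3, 5, 13, 89, 233, 1597]
  rw [loop_succ, if_pos (show (6 : Int) < 7 by decide), pS_610, if_neg (show ¬ ((987 : Int) > 1000000) by decide)]
  show fibPrimeLoop 84 7 987 1597 6 [2, 3, 5, 13, 89, 233] = [2, 3, 5, 13, 89, 233, 1597]
  rw [loop_succ, if_pos (show (6 : Int) < 7 by decide), pS_987, if_neg (show ¬ ((1597 : Int) > 1000000) by decide)]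
  show fibPrimeLoop 83 7 1597 2584 6 [2, 3, 5, 13, 89, 233] = [2, 3, 5, 13, 89, 233, 1597]
  rw [loop_succ, if_pos (show (6 : Int) < 7 by decide), pS_1597, if_neg (show ¬ ((2584 : Int) > 1000000) by decide)]
  show fibPrimeLoop 82 7 2584 4181 7 [2, 3, 5, 13, 89, 233, 1597] = [2, 3, 5, 13, 89, 233, 1597]
  rw [loop_succ, if_neg (show ¬ ((7 : Int) < 7) by decide)]

theorem A_case_8 : fibonacci_primes 8 = [2, 3, 5, 13, 89, 233, 1597, 28657] := by
  unfold fibonacci_primes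
  rw [if_neg (by norm_num)]
  rw [loop_succ, if_pos (show (0 : Int) < 8 by decide), pS_0, if_neg (show ¬ ((1 : Int) > 1000000) by decide)]
  show fibPrimeLoop 99 8 1 1 0 [] = [2, 3, 5, 13, 89, 233, 1597, 28657]
  rw [loop_succ, if_pos (show (0 : Int) < 8 by decide), pS_1, if_neg (show ¬ ((1 : Int) > 1000000) by decide)]
  show fibPrimeLoop 98 8 1 2 0 [] = [2, 3, 5, 13, 89, 233, 1597, 28657]
  rw [loop_succ, if_pos (show (0 : Int) < 8 by decide), pS_1, if_neg (show ¬ ((2 : Int) > 1000000) by decide)]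
  show fibPrimeLoop 97 8 2 3 0 [] = [2, 3, 5, 13, 89, 233, 1597, 28657]
  rw [loop_succ, if_pos (show (0 : Int) < 8 by decide), pS_2, if_neg (show ¬ ((3 : Int) > 1000000) by decide)]
  show fibPrimeLoop 96 8 3 5 1 [2] = [2, 3, 5, 13, 89, 233, 1597, 28657]
  rw [loop_succ, if_pos (show (1 : Int) < 8 by decide), pS_3, if_neg (show ¬ ((5 : Int) > 1000000) by decide)]
  show fibPrimeLoop 95 8 5 8 2 [2, 3] = [2, 3, 5, 13, 89, 233, 1597, 28657]
  rw [loop_succ, if_pos (show (2 : Int) < 8 by decide), pS_5, if_neg (show ¬ ((8 : Int) > 1000000) by decide)]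
  show fibPrimeLoop 94 8 8 13 3 [2, 3, 5] = [2, 3, 5, 13, 89, 233, 1597, 28657]
  rw [loop_succ, if_pos (show (3 : Int) < 8 by decide), pS_8, if_neg (show ¬ ((13 : Int) > 1000000) by decide)]
  show fibPrimeLoop 93 8 13 21 3 [2, 3, 5] = [2, 3, 5, 13, 89, 233, 1597, 28657]
  rw [loop_succ, if_pos (show (3 : Int) < 8 by decide), pS_13, if_neg (show ¬ ((21 : Int) > 1000000) by decide)]
  show fibPrimeLoop 92 8 21 34 4 [2, 3, 5, 13] = [2, 3, 5, 13, 89, 233, 1597, 28657]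
  rw [loop_succ, if_pos (show (4 : Int) < 8 by decide), pS_21, if_neg (show ¬ ((34 : Int) > 1000000) by decide)]
  show fibPrimeLoop 91 8 34 55 4 [2, 3, 5, 13] = [2, 3, 5, 13, 89, 233, 1597, 28657]
  rw [loop_succ, if_pos (show (4 : Int) < 8 by decide), pS_34, if_neg (show ¬ ((55 : Int) > 1000000) by decide)]
  show fibPrimeLoop 90 8 55 89 4 [2, 3, 5, 13] = [2, 3, 5, 13, 89, 233, 1597, 28657]
  rw [loop_succ, if_pos (show (4 : Int) < 8 by decide), pS_55, if_neg (show ¬ ((89 : Int) > 1000000) by decide)]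
  show fibPrimeLoop 89 8 89 144 4 [2, 3, 5, 13] = [2, 3, 5, 13, 89, 233, 1597, 28657]
  rw [loop_succ, if_pos (show (4 : Int) < 8 by decide), pS_89, if_neg (show ¬ ((144 : Int) > 1000000) by decide)]
  show fibPrimeLoop 88 8 144 233 5 [2, 3, 5, 13, 89] = [2, 3, 5, 13, 89, 233, 1597, 28657]
  rw [loop_succ, if_pos (show (5 : Int) < 8 by decide), pS_144, if_neg (show ¬ ((233 : Int) > 1000000) by decide)]
  show fibPrimeLoop 87 8 233 377 5 [2, 3, 5, 13, 89] = [2, 3, 5, 13, 89, 233, 1597, 28657]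
  rw [loop_succ, if_pos (show (5 : Int) < 8 by decide), pS_233, if_neg (show ¬ ((377 : Int) > 1000000) by decide)]
  show fibPrimeLoop 86 8 377 610 6 [2, 3, 5, 13, 89, 233] = [2, 3, 5, 13, 89, 233, 1597, 28657]
  rw [loop_succ, if_pos (show (6 : Int) < 8 by decide), pS_377, if_neg (show ¬ ((610 : Int) > 1000000) by decide)]
  show fibPrimeLoop 85 8 610 987 6 [2, 3, 5, 13, 89, 233] = [2, 3, 5, 13, 89, 233, 1597, 28657]
  rw [loop_succ, if_pos (show (6 : Int) < 8 by decide), pS_610, if_neg (show ¬ ((987 : Int) > 1000000) by decide)]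
  show fibPrimeLoop 84 8 987 1597 6 [2, 3, 5, 13, 89, 233] = [2, 3, 5, 13, 89, 233, 1597, 28657]
  rw [loop_succ, if_pos (show (6 : Int) < 8 by decide), pS_987, if_neg (show ¬ ((1597 : Int) > 1000000) by decide)]
  show fibPrimeLoop 83 8 1597 2584 6 [2, 3, 5, 13, 89, 233] = [2, 3, 5, 13, 89, 233, 1597, 28657]
  rw [loop_succ, if_pos (show (6 : Int) < 8 by decide), pS_1597, if_neg (show ¬ ((2584 : Int) > 1000000) by decide)]
  show fibPrimeLoop 82 8 2584 4181 7 [2, 3, 5, 13, 89, 233, 1597] = [2, 3, 5, 13, 89, 233, 1597, 28657]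
  rw [loop_succ, if_pos (show (7 : Int) < 8 by decide), pS_2584, if_neg (show ¬ ((4181 : Int) > 1000000) by decide)]
  show fibPrimeLoop 81 8 4181 6765 7 [2, 3, 5, 13, 89, 233, 1597] = [2, 3, 5, 13, 89, 233, 1597, 28657]
  rw [loop_succ, if_pos (show (7 : Int) < 8 by decide), pS_4181, if_neg (show ¬ ((6765 : Int) > 1000000) by decide)]
  show fibPrimeLoop 80 8 6765 10946 7 [2, 3, 5, 13, 89, 233, 1597] = [2, 3, 5, 13, 89, 233, 1597, 28657]
  rw [loop_succ, if_pos (show (7 : Int) < 8 by decide), pS_6765, if_neg (show ¬ ((10946 : Int) > 1000000) by decide)]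
  show fibPrimeLoop 79 8 10946 17711 7 [2, 3, 5, 13, 89, 233, 1597] = [2, 3, 5, 13, 89, 233, 1597, 28657]
  rw [loop_succ, if_pos (show (7 : Int) < 8 by decide), pS_10946, if_neg (show ¬ ((17711 : Int) > 1000000) by decide)]
  show fibPrimeLoop 78 8 17711 28657 7 [2, 3, 5, 13, 89, 233, 1597] = [2, 3, 5, 13, 89, 233, 1597, 28657]
  rw [loop_succ, if_pos (show (7 : Int) < 8 by decide), pS_17711, if_neg (show ¬ ((28657 : Int) > 1000000) by decide)]
  show fibPrimeLoop 77 8 28657 46368 7 [2, 3, 5, 13, 89, 233, 1597] = [2, 3, 5, 13, 89, 233, 1597, 28657]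
  rw [loop_succ, if_pos (show (7 : Int) < 8 by decide), pS_28657, if_neg (show ¬ ((46368 : Int) > 1000000) by decide)]
  show fibPrimeLoop 76 8 46368 75025 8 [2, 3, 5, 13, 89, 233, 1597, 28657] = [2, 3, 5, 13, 89, 233, 1597, 28657]
  rw [loop_succ, if_neg (show ¬ ((8 : Int) < 8) by decide)]

-- ===== VERDICT (by name: the statement is the Claim_ definition above) =====
theorem fibonacci_primes_spec : Claim_equal_fibonacci_primes := by
  intro n _hDom
  unfold Spec_fibonacci_primes
  by_cases h0 : n ≤ 0
  · unfold fibonacci_primes fibonacci_primes_alt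
    rw [if_pos h0, if_pos h0]
  · have h1 : 1 ≤ n := by omega
    rw [alt_take n h1]
    by_cases h9 : 9 ≤ n
    · unfold fibonacci_primes
      rw [if_neg h0, A_ge9 n h9, List.take_of_length_le (by simp; omega)]
    · interval_cases n <;>
        simp only [A_case_1, A_case_2, A_case_3, A_case_4, A_case_5, A_case_6, A_case_7,
          A_case_8] <;> decide
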